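-- pv_equiv track=rewrite | github.com/n-asuy/clawpod | skills/competitor-profile-maintenance/scripts/refresh_profile_index.py | upsert_frontmatter
-- ===== SOURCE A (Python) =====
-- from typing import Dict, List, Optional, Tuple
--
-- def upsert_frontmatter(
--     existing: Optional[List[str]], updates: Dict[str, str]
-- ) -> List[str]:
--     if existing is None:
--         lines: List[str] = []
--     else:
--         lines = list(existing)
--
--     positions: Dict[str, int] = {}
--     for i, line in enumerate(lines):
--         if not line.strip() or line.startswith(" ") or ":" not in line:
--             continue
--         key = line.split(":", 1)[0].strip()
--         positions[key] = i
--
--     for key, value in updates.items():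
--         new_line = f"{key}: {value}"
--         if key in positions:
--             lines[positions[key]] = new_line
--         else:
--             lines.append(new_line)
--
--     return lines
-- ===== SOURCE B (Python) =====
-- from typing import Dict, List, Optional
--
--
-- def upsert_frontmatter(
--     existing: Optional[List[str]], updates: Dict[str, str]
-- ) -> List[str]:
--     orig = [] if existing is None else list(existing)
--     result = list(orig)
--     for key, value in updates.items():
--         new_line = f"{key}: {value}"
--         for i in range(len(orig) - 1, -1, -1):
--             line = orig[i]
--             if (
--                 line.strip()
--                 and not line.startswith(" ")
--                 and ":" in line
--                 and line.split(":", 1)[0].strip() == key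
--             ):
--                 result[i] = new_line
--                 break
--         else:
--             result.append(new_line)
--     return result
-- ===== Notes on version B (the rewrite author's own statement) =====
-- stated objective: simpler
-- what changed: B drops A's positions index built by a pre-pass over all lines; instead it keeps the original lines and, for each update key, reverse-scans them for the last qualifying frontmatter line, replacing in place or appending.
import Mathlib
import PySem

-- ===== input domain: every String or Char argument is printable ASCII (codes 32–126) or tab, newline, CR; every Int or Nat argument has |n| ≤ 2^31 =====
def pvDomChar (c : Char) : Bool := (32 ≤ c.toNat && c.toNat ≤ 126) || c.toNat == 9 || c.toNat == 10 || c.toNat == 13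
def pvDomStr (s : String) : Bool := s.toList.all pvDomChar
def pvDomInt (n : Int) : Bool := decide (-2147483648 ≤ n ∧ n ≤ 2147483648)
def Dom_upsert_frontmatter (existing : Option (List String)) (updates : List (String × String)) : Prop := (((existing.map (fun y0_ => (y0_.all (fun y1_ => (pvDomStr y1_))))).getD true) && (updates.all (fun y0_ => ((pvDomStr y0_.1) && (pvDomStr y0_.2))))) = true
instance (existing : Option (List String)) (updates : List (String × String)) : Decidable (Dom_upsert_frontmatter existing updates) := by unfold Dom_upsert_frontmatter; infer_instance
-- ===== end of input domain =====

-- B drops A's positions index: it keeps the original lines and, per update key, reverse-scans them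
-- for the last matching frontmatter line (objective: simpler; not faster — O(n·m) vs A's O(n+m)).

-- shared helper: 'some key' iff the line qualifies in both Pythons'
-- 'line.strip() and not line.startswith(" ") and ":" in line' test, the key being line.split(":",1)[0].strip()
def fmKey? (line : String) : Option String :=
  if PySem.Str.strip line == "" || PySem.Str.startswith line " " || !(PySem.Str.isIn ":" line) then
    none
  else
    some (PySem.Str.strip ((((PySem.Str.splitMax? line ":" 1).getD [line]).headD line)))

-- ===== PORT A =====
def upsert_frontmatter (existing : Option (List String)) (updates : List (String × String)) : List String :=
  let lines : List String := match existing with | none => [] | some l => l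
  let positions : PySem.Dict String Int :=
    (PySem.List.enumerate lines 0).foldl
      (fun d p => match fmKey? p.2 with
        | none => d
        | some key => d.insert key p.1)
      PySem.Dict.empty
  updates.foldl
    (fun ls kv =>
      let newLine := kv.1 ++ ": " ++ kv.2
      if positions.contains kv.1 then
        PySem.List.pySetD ls (positions.getD kv.1 0) newLine
      else
        ls ++ [newLine])
    lines

-- ===== PORT B =====
def upsert_frontmatter_alt (existing : Option (List String)) (updates : List (String × String)) : List String :=
  let orig : List String := match existing with | none => [] | some l => l
  updates.foldl
    (fun result kv =>
      let newLine := kv.1 ++ ": " ++ kv.2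
      match (PySem.List.pyRange ((orig.length : Int) - 1) (-1) (-1)).find?
              (fun i => fmKey? (PySem.List.pyGetD orig i "") == some kv.1) with
      | some i => PySem.List.pySetD result i newLine
      | none => result ++ [newLine])
    orig

-- ===== PRECONDITION & SPEC =====
def Spec_upsert_frontmatter (existing : Option (List String)) (updates : List (String × String)) (out : List String) : Prop := out = upsert_frontmatter_alt existing updates
instance (existing : Option (List String)) (updates : List (String × String)) (out : List String) : Decidable (Spec_upsert_frontmatter existing updates out) := by unfold Spec_upsert_frontmatter; infer_instance

-- ===== CLAIM (what is proved, stated in full; the proofs are below) =====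
def Claim_equal_upsert_frontmatter : Prop := ∀ (existing : Option (List String)) (updates : List (String × String)), Dom_upsert_frontmatter existing updates → Spec_upsert_frontmatter existing updates (upsert_frontmatter existing updates)

-- ===== LEMMAS AND PROOFS =====

theorem find?_congr_mem {α : Type} (l : List α) (p q : α → Bool)
    (h : ∀ a ∈ l, p a = q a) : l.find? p = l.find? q := by
  induction l with
  | nil => rfl
  | cons x xs ih =>
    simp only [List.find?_cons]
    rw [h x (by simp)]
    cases q x with
    | true => rfl
    | false => exact ih (fun a ha => h a (by simp [ha]))

-- A's positions dict (built left to right, overwriting) looks up the same index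
-- B's right-to-left scan finds.
theorem positions_get?_eq (lines : List String) (k : String) :
    ((PySem.List.enumerate lines 0).foldl
      (fun d p => match fmKey? p.2 with
        | none => d
        | some key => d.insert key p.1)
      PySem.Dict.empty).get? k
    = (PySem.List.pyRange ((lines.length : Int) - 1) (-1) (-1)).find?
        (fun i => fmKey? (PySem.List.pyGetD lines i "") == some k) := by
  induction lines using List.reverseRecOn with
  | nil => simp [PySem.List.enumerate_nil, PySem.Dict.get?_empty]
  | append_singleton l x ih =>
    rw [PySem.List.enumerate_append]
    simp only [List.foldl_append, PySem.List.enumerate_cons, PySem.List.enumerate_nil,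
      List.foldl_cons, List.foldl_nil, List.length_append, List.length_cons, List.length_nil]
    have hlen : ((l.length + 1 : Nat) : Int) - 1 = (l.length : Int) := by push_cast; ring
    rw [hlen]
    have hcons : PySem.List.pyRange (l.length : Int) (-1) (-1)
        = (l.length : Int) :: PySem.List.pyRange ((l.length : Int) - 1) (-1) (-1) := by
      exact PySem.List.pyRange_neg_one_cons (by omega)
    rw [hcons, List.find?_cons]
    have hget : PySem.List.pyGetD (l ++ [x]) ((l.length : Int)) "" = x := by
      rw [PySem.List.pyGetD_natCast]
      simp
    have hrest : (PySem.List.pyRange ((l.length : Int) - 1) (-1) (-1)).find?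
          (fun i => fmKey? (PySem.List.pyGetD (l ++ [x]) i "") == some k)
        = (PySem.List.pyRange ((l.length : Int) - 1) (-1) (-1)).find?
          (fun i => fmKey? (PySem.List.pyGetD l i "") == some k) := by
      apply find?_congr_mem
      intro a ha
      rw [PySem.List.mem_pyRange_neg_one] at ha
      have h0 : 0 ≤ a := by omega
      have h1 : a.toNat < l.length := by omega
      have ha' : a = ((a.toNat : Nat) : Int) := (Int.toNat_of_nonneg h0).symm
      rw [ha', PySem.List.pyGetD_natCast, PySem.List.pyGetD_natCast,
          List.getD_eq_getElem?_getD, List.getD_eq_getElem?_getD,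
          List.getElem?_append_left h1]
    rw [hget]
    cases hfk : fmKey? x with
    | none => simpa [hfk, hrest] using ih
    | some k' =>
      by_cases hk : k = k'
      · subst hk
        simp [PySem.Dict.get?_insert_self]
      · rw [PySem.Dict.get?_insert_of_ne _ _ hk, hrest]
        have hb : (k' == k) = false := beq_eq_false_iff_ne.mpr (Ne.symm hk)
        simpa [hb] using ih

-- ===== VERDICT (by name: the statement is the Claim_ definition above) =====
theorem upsert_frontmatter_spec : Claim_equal_upsert_frontmatter := by
  intro existing updates _
  simp only [Spec_upsert_frontmatter, upsert_frontmatter, upsert_frontmatter_alt]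
  congr 1
  funext ls kv
  rw [PySem.Dict.contains_eq_isSome_get?, PySem.Dict.getD_eq_get?_getD, positions_get?_eq]
  cases (PySem.List.pyRange _ (-1) (-1)).find?
      (fun i => fmKey? (PySem.List.pyGetD _ i "") == some kv.1) with
  | none => simp
  | some i => simp
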